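-- pv_equiv track=rewrite | github.com/chridey/fixedthat | fixedthat/preprocessing/ftfy_utils.py | get_nearest_boundary
-- ===== SOURCE A (Python) =====
-- def get_nearest_boundary(parent, parent_range):
--     ctr = 0
--     left_boundary = 0
--     right_boundary = None
--     for i in parent:
--         ctr += len(i['words'])
--         if ctr <= parent_range[0]:
--             left_boundary = ctr
--         if ctr >= parent_range[1] and right_boundary is None:
--             right_boundary = ctr-1
--
--     return left_boundary, right_boundary
-- ===== SOURCE B (Python) =====
-- def get_nearest_boundary(parent, parent_range):
--     # Build the prefix-sum table once, then find each boundary by binary search.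
--     prefix = []
--     total = 0
--     for i in parent:
--         total += len(i['words'])
--         prefix.append(total)
--     lo, hi = parent_range
--     # rightmost insertion point for lo (bisect_right): first index with prefix[m] > lo
--     l, r = 0, len(prefix)
--     while l < r:
--         m = (l + r) // 2
--         if prefix[m] <= lo:
--             l = m + 1
--         else:
--             r = m
--     left_boundary = prefix[l - 1] if l > 0 else 0
--     # leftmost insertion point for hi (bisect_left): first index with prefix[m] >= hi
--     l, r = 0, len(prefix)
--     while l < r:
--         m = (l + r) // 2
--         if prefix[m] < hi:
--             l = m + 1
--         else:
--             r = m
--     right_boundary = prefix[l] - 1 if l < len(prefix) else None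
--     return left_boundary, right_boundary
-- ===== Notes on version B (the rewrite author's own statement) =====
-- stated objective: alternative
-- what changed: Replaces the single flag-carrying scan with an explicit prefix-sum table plus two hand-written binary searches (bisect_right for the left boundary, bisect_left for the right).
import Mathlib
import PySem

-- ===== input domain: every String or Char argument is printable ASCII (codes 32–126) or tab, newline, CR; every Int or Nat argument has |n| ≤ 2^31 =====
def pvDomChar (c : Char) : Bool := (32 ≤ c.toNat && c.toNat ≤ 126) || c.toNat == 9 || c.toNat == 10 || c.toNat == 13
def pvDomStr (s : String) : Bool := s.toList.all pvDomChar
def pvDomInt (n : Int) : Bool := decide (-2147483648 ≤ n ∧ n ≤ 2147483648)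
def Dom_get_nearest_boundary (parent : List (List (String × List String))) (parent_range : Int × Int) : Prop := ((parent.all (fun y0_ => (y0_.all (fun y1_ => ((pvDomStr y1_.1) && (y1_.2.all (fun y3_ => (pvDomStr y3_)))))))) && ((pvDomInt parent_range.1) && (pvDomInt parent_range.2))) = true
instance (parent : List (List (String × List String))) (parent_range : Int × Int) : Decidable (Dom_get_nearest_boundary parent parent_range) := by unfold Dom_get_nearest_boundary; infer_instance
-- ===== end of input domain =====

-- B replaces A's flag-carrying single scan by an explicit prefix-sum table plus two binary searches.

-- shared dict-lookup helper: first match of key "words" (Python dict access i['words']);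
-- on inputs where the key is missing Python raises KeyError — those are excluded by Pre_,
-- so the .getD [] default below is never reached on claimed inputs.
def lookupWords : List (String × List String) → Option (List String)
  | [] => none
  | (k, v) :: rest => if k == "words" then some v else lookupWords rest

def wordsLen (i : List (String × List String)) : Int := ((lookupWords i).getD []).length

-- ===== PORT A =====
def stepA (lo hi : Int) (s : Int × Int × Option Int) (i : List (String × List String)) : Int × Int × Option Int :=
  let ctr := s.1 + wordsLen i
  ( ctr,
    (if ctr ≤ lo then ctr else s.2.1),
    (if ctr ≥ hi ∧ s.2.2 = none then some (ctr - 1) else s.2.2) )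

def get_nearest_boundary (parent : List (List (String × List String))) (parent_range : Int × Int) : Int × Option Int :=
  let s := parent.foldl (stepA parent_range.1 parent_range.2) (0, 0, none)
  (s.2.1, s.2.2)

-- ===== PORT B =====
def prefixSums (parent : List (List (String × List String))) : List Int :=
  (parent.foldl (fun (acc : List Int × Int) i =>
    let t := acc.2 + wordsLen i
    (acc.1 ++ [t], t)) ([], 0)).1

-- while l < r: m = (l+r)//2; if prefix[m] <= x: l = m+1 else r = m  (bisect_right; the fuel
-- argument only bounds the iteration count — r - l shrinks each pass, so fuel = len suffices)
def bisR (P : List Int) (x : Int) : Nat → Nat → Nat → Nat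
  | 0, l, _ => l
  | fuel + 1, l, r =>
    if l < r then
      if P.getD ((l + r) / 2) 0 ≤ x then bisR P x fuel ((l + r) / 2 + 1) r
      else bisR P x fuel l ((l + r) / 2)
    else l

-- while l < r: m = (l+r)//2; if prefix[m] < x: l = m+1 else r = m  (bisect_left)
def bisL (P : List Int) (x : Int) : Nat → Nat → Nat → Nat
  | 0, l, _ => l
  | fuel + 1, l, r =>
    if l < r then
      if P.getD ((l + r) / 2) 0 < x then bisL P x fuel ((l + r) / 2 + 1) r
      else bisL P x fuel l ((l + r) / 2)
    else l

def get_nearest_boundary_alt (parent : List (List (String × List String))) (parent_range : Int × Int) : Int × Option Int :=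
  let P := prefixSums parent
  let j1 := bisR P parent_range.1 P.length 0 P.length
  let left := if 0 < j1 then P.getD (j1 - 1) 0 else 0
  let j2 := bisL P parent_range.2 P.length 0 P.length
  let right := if j2 < P.length then some (P.getD j2 0 - 1) else none
  (left, right)

-- ===== PRECONDITION & SPEC =====
-- Pre_ excludes exactly the inputs where some element lacks the key "words": there Python A raises KeyError.
def Pre_get_nearest_boundary (parent : List (List (String × List String))) (parent_range : Int × Int) : Prop :=
  ∀ i ∈ parent, "words" ∈ i.map Prod.fst
instance (parent : List (List (String × List String))) (parent_range : Int × Int) : Decidable (Pre_get_nearest_boundary parent parent_range) := by unfold Pre_get_nearest_boundary; infer_instance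

def pvWitness_get_nearest_boundary : (List (List (String × List String))) × (Int × Int) :=
  ([[("words", ["a", "b"])], [("words", ["c"])]], (2, 3))

def Spec_get_nearest_boundary (parent : List (List (String × List String))) (parent_range : Int × Int) (out : Int × Option Int) : Prop := out = get_nearest_boundary_alt parent parent_range
instance (parent : List (List (String × List String))) (parent_range : Int × Int) (out : Int × Option Int) : Decidable (Spec_get_nearest_boundary parent parent_range out) := by unfold Spec_get_nearest_boundary; infer_instance

-- ===== CLAIM (what is proved, stated in full; the proofs are below) =====
def Claim_equal_get_nearest_boundary : Prop := ∀ (parent : List (List (String × List String))) (parent_range : Int × Int), Dom_get_nearest_boundary parent parent_range → Pre_get_nearest_boundary parent parent_range → Spec_get_nearest_boundary parent parent_range (get_nearest_boundary parent parent_range)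

-- ===== LEMMAS AND PROOFS =====

theorem wordsLen_nonneg (i : List (String × List String)) : 0 ≤ wordsLen i := by
  unfold wordsLen; exact Int.natCast_nonneg _

-- proof-side prefix-sum list
def pfx (t : Int) : List (List (String × List String)) → List Int
  | [] => []
  | i :: is => (t + wordsLen i) :: pfx (t + wordsLen i) is

theorem prefixSums_aux (l : List (List (String × List String))) :
    ∀ (acc : List Int) (t : Int),
      (l.foldl (fun (acc : List Int × Int) i =>
        let t := acc.2 + wordsLen i
        (acc.1 ++ [t], t)) (acc, t)).1 = acc ++ pfx t l := by
  induction l with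
  | nil => intro acc t; simp [pfx]
  | cons i is ih =>
    intro acc t
    simp only [List.foldl_cons, pfx]
    rw [ih]
    simp

theorem prefixSums_eq (parent : List (List (String × List String))) :
    prefixSums parent = pfx 0 parent := by
  unfold prefixSums
  rw [prefixSums_aux]
  simp

theorem pfx_ge (t : Int) (l : List (List (String × List String))) :
    ∀ x ∈ pfx t l, t ≤ x := by
  induction l generalizing t with
  | nil => simp [pfx]
  | cons i is ih =>
    intro x hx
    simp only [pfx, List.mem_cons] at hx
    rcases hx with rfl | hx
    · have := wordsLen_nonneg i; omega
    · have := ih (t + wordsLen i) x hx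
      have := wordsLen_nonneg i; omega

theorem pfx_mono (t : Int) (l : List (List (String × List String))) :
    (pfx t l).Pairwise (· ≤ ·) := by
  induction l generalizing t with
  | nil => simp [pfx]
  | cons i is ih =>
    simp only [pfx, List.pairwise_cons]
    exact ⟨pfx_ge _ _, ih _⟩

theorem getD_mono {P : List Int} (hp : P.Pairwise (· ≤ ·)) :
    ∀ i j, i ≤ j → j < P.length → P.getD i 0 ≤ P.getD j 0 := by
  intro i j hij hj
  rcases Nat.eq_or_lt_of_le hij with rfl | hlt
  · exact le_refl _
  · rw [List.getD_eq_getElem _ _ (lt_trans hlt hj), List.getD_eq_getElem _ _ hj]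
    exact (List.pairwise_iff_getElem.mp hp) i j _ _ hlt

theorem bisR_spec (P : List Int) (x : Int)
    (hmono : ∀ i j, i ≤ j → j < P.length → P.getD i 0 ≤ P.getD j 0) :
    ∀ (n l r : Nat), r - l ≤ n → l ≤ r → r ≤ P.length →
      (∀ i, i < l → P.getD i 0 ≤ x) →
      (∀ i, r ≤ i → i < P.length → x < P.getD i 0) →
      (∀ i, i < bisR P x n l r → P.getD i 0 ≤ x) ∧
      (∀ i, bisR P x n l r ≤ i → i < P.length → x < P.getD i 0) ∧
      bisR P x n l r ≤ P.length := by
  intro n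
  induction n with
  | zero =>
    intro l r hn hlr hr hL hR
    show _ ∧ _ ∧ bisR P x 0 l r ≤ P.length
    simp only [bisR]
    exact ⟨hL, fun i hi => hR i (by omega), by omega⟩
  | succ n ih =>
    intro l r hn hlr hr hL hR
    show _ ∧ _ ∧ bisR P x (n + 1) l r ≤ P.length
    simp only [bisR]
    by_cases h : l < r
    · rw [if_pos h]
      have hm1 : l ≤ (l + r) / 2 := by omega
      have hm2 : (l + r) / 2 < r := by omega
      by_cases c : P.getD ((l + r) / 2) 0 ≤ x
      · rw [if_pos c]
        refine ih ((l + r) / 2 + 1) r (by omega) (by omega) hr ?_ hR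
        intro i hi
        exact le_trans (hmono i ((l + r) / 2) (by omega) (by omega)) c
      · rw [if_neg c]
        refine ih l ((l + r) / 2) (by omega) (by omega) (by omega) hL ?_
        intro i hi hilen
        exact lt_of_lt_of_le (not_le.mp c) (hmono ((l + r) / 2) i hi hilen)
    · rw [if_neg h]
      exact ⟨hL, fun i hi => hR i (by omega), by omega⟩

theorem bisL_spec (P : List Int) (x : Int)
    (hmono : ∀ i j, i ≤ j → j < P.length → P.getD i 0 ≤ P.getD j 0) :
    ∀ (n l r : Nat), r - l ≤ n → l ≤ r → r ≤ P.length →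
      (∀ i, i < l → P.getD i 0 < x) →
      (∀ i, r ≤ i → i < P.length → x ≤ P.getD i 0) →
      (∀ i, i < bisL P x n l r → P.getD i 0 < x) ∧
      (∀ i, bisL P x n l r ≤ i → i < P.length → x ≤ P.getD i 0) ∧
      bisL P x n l r ≤ P.length := by
  intro n
  induction n with
  | zero =>
    intro l r hn hlr hr hL hR
    show _ ∧ _ ∧ bisL P x 0 l r ≤ P.length
    simp only [bisL]
    exact ⟨hL, fun i hi => hR i (by omega), by omega⟩
  | succ n ih =>
    intro l r hn hlr hr hL hR
    show _ ∧ _ ∧ bisL P x (n + 1) l r ≤ P.length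
    simp only [bisL]
    by_cases h : l < r
    · rw [if_pos h]
      have hm1 : l ≤ (l + r) / 2 := by omega
      have hm2 : (l + r) / 2 < r := by omega
      by_cases c : P.getD ((l + r) / 2) 0 < x
      · rw [if_pos c]
        refine ih ((l + r) / 2 + 1) r (by omega) (by omega) hr ?_ hR
        intro i hi
        exact lt_of_le_of_lt (hmono i ((l + r) / 2) (by omega) (by omega)) c
      · rw [if_neg c]
        refine ih l ((l + r) / 2) (by omega) (by omega) (by omega) hL ?_
        intro i hi hilen
        exact le_trans (not_lt.mp c) (hmono ((l + r) / 2) i hi hilen)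
    · rw [if_neg h]
      exact ⟨hL, fun i hi => hR i (by omega), by omega⟩

-- loop body of A restricted to the two boundary components, fed the prefix sums
def gstep (lo hi : Int) (s : Int × Option Int) (p : Int) : Int × Option Int :=
  (if p ≤ lo then p else s.1, if p ≥ hi ∧ s.2 = none then some (p - 1) else s.2)

theorem foldA_eq (lo hi : Int) (l : List (List (String × List String))) :
    ∀ (c lb : Int) (rb : Option Int),
      (l.foldl (stepA lo hi) (c, lb, rb)).2 = (pfx c l).foldl (gstep lo hi) (lb, rb) := by
  intro c lb rb
  induction l generalizing c lb rb with
  | nil => rfl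
  | cons i is ih => simp only [pfx, List.foldl_cons, stepA, gstep]; exact ih _ _ _

theorem foldg_fst (lo hi : Int) (P : List Int) :
    ∀ (lb : Int) (rb : Option Int),
      ((P.foldl (gstep lo hi) (lb, rb)).1) = ((P.filter (fun p => decide (p ≤ lo))).getLast?).getD lb := by
  induction P with
  | nil => intro lb rb; rfl
  | cons p ps ih =>
    intro lb rb
    simp only [List.foldl_cons, List.filter_cons]
    by_cases c : p ≤ lo
    · simp only [gstep, if_pos c, c, decide_true]
      rw [ih]
      simp [List.getLast?_cons, List.getLastD_eq_getLast?]
    · simp only [gstep, if_neg c, c, decide_false]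
      exact ih _ _

theorem foldg_snd_some (lo hi : Int) (P : List Int) :
    ∀ (lb v : Int), (P.foldl (gstep lo hi) (lb, some v)).2 = some v := by
  induction P with
  | nil => intro lb v; rfl
  | cons p ps ih =>
    intro lb v
    simp only [List.foldl_cons, gstep]
    have : ¬ (p ≥ hi ∧ (some v : Option Int) = none) := by simp
    rw [if_neg this]
    exact ih _ _

theorem foldg_snd (lo hi : Int) (P : List Int) :
    ∀ (lb : Int), (P.foldl (gstep lo hi) (lb, none)).2 = (P.find? (fun p => decide (hi ≤ p))).map (· - 1) := by
  induction P with
  | nil => intro lb; rfl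
  | cons p ps ih =>
    intro lb
    by_cases c : hi ≤ p
    · simp [gstep, c, foldg_snd_some, List.find?_cons]
    · simp [gstep, c, ih, List.find?_cons]

theorem filter_eq_take {q : Int → Bool} :
    ∀ (P : List Int) (j : Nat), j ≤ P.length →
      (∀ i, i < j → q (P.getD i 0) = true) →
      (∀ i, j ≤ i → i < P.length → q (P.getD i 0) = false) →
      P.filter q = P.take j := by
  intro P
  induction P with
  | nil => intro j hj _ _; simp at hj; simp [hj]
  | cons p ps ih =>
    intro j hj h1 h2
    match j with
    | 0 =>
      simp only [List.take_zero]
      have hp : q p = false := by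
        have := h2 0 (by omega) (by simp)
        simpa using this
      rw [List.filter_cons_of_neg (by simp [hp])]
      rw [ih 0 (by omega) (fun i hi => absurd hi (by omega))
        (fun i _ hi => by simpa using h2 (i + 1) (by omega) (by simpa using Nat.succ_lt_succ hi))]
      simp
    | k + 1 =>
      have hp : q p = true := by simpa using h1 0 (by omega)
      rw [List.filter_cons_of_pos (by simp [hp]), List.take_succ_cons]
      congr 1
      exact ih k (by simpa using hj)
        (fun i hi => by simpa using h1 (i + 1) (by omega))
        (fun i hki hi => by simpa using h2 (i + 1) (by omega) (by simpa using Nat.succ_lt_succ hi))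

theorem find?_eq_getD {q : Int → Bool} :
    ∀ (P : List Int) (j : Nat), j ≤ P.length →
      (∀ i, i < j → q (P.getD i 0) = false) →
      (j < P.length → q (P.getD j 0) = true) →
      P.find? q = if j < P.length then some (P.getD j 0) else none := by
  intro P
  induction P with
  | nil => intro j hj _ _; simp
  | cons p ps ih =>
    intro j hj h1 h2
    match j with
    | 0 =>
      have hp : q p = true := by simpa using h2 (by simp)
      simp [List.find?_cons, hp]
    | k + 1 =>
      have hp : q p = false := by simpa using h1 0 (by omega)
      rw [List.find?_cons_of_neg (by simp [hp])]
      rw [ih k (by simpa using hj)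
        (fun i hi => by simpa using h1 (i + 1) (by omega))
        (fun hk => by simpa using h2 (by simpa using Nat.succ_lt_succ hk))]
      simp only [List.length_cons]
      by_cases hk : k < ps.length
      · rw [if_pos hk, if_pos (by omega)]
        simp
      · rw [if_neg hk, if_neg (by omega)]

theorem getLast?_take {P : List Int} {j : Nat} (h0 : 0 < j) (hj : j ≤ P.length) :
    (P.take j).getLast? = some (P.getD (j - 1) 0) := by
  have hlen : (P.take j).length = j := by simp [hj]
  rw [List.getLast?_eq_getElem?, hlen]
  have hjl : j - 1 < j := by omega
  rw [List.getElem?_take_of_lt hjl]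
  rw [List.getElem?_eq_getElem (by omega), List.getD_eq_getElem _ _ (by omega)]

theorem A_closed (parent : List (List (String × List String))) (pr : Int × Int) :
    get_nearest_boundary parent pr =
      (((pfx 0 parent).foldl (gstep pr.1 pr.2) (0, none)).1,
       ((pfx 0 parent).foldl (gstep pr.1 pr.2) (0, none)).2) := by
  have h := foldA_eq pr.1 pr.2 parent 0 0 none
  show ((parent.foldl (stepA pr.1 pr.2) (0, 0, none)).2.1,
        (parent.foldl (stepA pr.1 pr.2) (0, 0, none)).2.2) = _
  rw [h]

theorem B_closed (parent : List (List (String × List String))) (pr : Int × Int) :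
    get_nearest_boundary_alt parent pr =
      (let Q := prefixSums parent;
       (if 0 < bisR Q pr.1 Q.length 0 Q.length then Q.getD (bisR Q pr.1 Q.length 0 Q.length - 1) 0 else 0,
        if bisL Q pr.2 Q.length 0 Q.length < Q.length then some (Q.getD (bisL Q pr.2 Q.length 0 Q.length) 0 - 1) else none)) := rfl

-- ===== VERDICT (by name: the statement is the Claim_ definition above) =====
theorem get_nearest_boundary_spec : Claim_equal_get_nearest_boundary := by
  intro parent pr _ _
  unfold Spec_get_nearest_boundary
  rw [A_closed, B_closed]
  simp only [prefixSums_eq]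
  have hmono := getD_mono (pfx_mono 0 parent)
  generalize hQgen : pfx 0 parent = Q at hmono ⊢
  obtain ⟨hj1L, hj1R, hj1len⟩ := bisR_spec Q pr.1 hmono Q.length 0 Q.length (by omega) (by omega) (le_refl _)
    (fun i hi => absurd hi (by omega)) (fun i hi hil => absurd hil (by omega))
  obtain ⟨hj2L, hj2R, hj2len⟩ := bisL_spec Q pr.2 hmono Q.length 0 Q.length (by omega) (by omega) (le_refl _)
    (fun i hi => absurd hi (by omega)) (fun i hi hil => absurd hil (by omega))
  set j1 := bisR Q pr.1 Q.length 0 Q.length with hj1def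
  set j2 := bisL Q pr.2 Q.length 0 Q.length with hj2def
  have hfilter : Q.filter (fun p => decide (p ≤ pr.1)) = Q.take j1 :=
    filter_eq_take Q j1 hj1len (fun i hi => by simpa using hj1L i hi)
      (fun i hji hil => by simpa using not_le.mpr (hj1R i hji hil))
  have hfind : Q.find? (fun p => decide (pr.2 ≤ p)) = if j2 < Q.length then some (Q.getD j2 0) else none :=
    find?_eq_getD Q j2 hj2len (fun i hi => by simpa using not_le.mpr (hj2L i hi))
      (fun hl => by simpa using hj2R j2 (le_refl _) hl)
  refine Prod.ext ?_ ?_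
  · show (Q.foldl (gstep pr.1 pr.2) (0, none)).1 = _
    rw [foldg_fst, hfilter]
    by_cases h0 : 0 < j1
    · rw [getLast?_take h0 hj1len, if_pos h0]
      rfl
    · have h1 : j1 = 0 := by omega
      rw [h1]
      simp
  · show (Q.foldl (gstep pr.1 pr.2) (0, none)).2 = _
    rw [foldg_snd, hfind]
    by_cases hl : j2 < Q.length
    · simp [hl]
    · simp [hl]
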